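-- pv_equiv track=rewrite | github.com/Zyh2333/DejaVu | CausIL/run_graph.py | count
-- ===== SOURCE A (Python) =====
-- def count(root_cause, failure_instance_scores):
--     os_count = 0
--     for i in range(len(failure_instance_scores)):
--         if 'os' in failure_instance_scores[i][0] or 'db' in failure_instance_scores[i][0]:
--             os_count += 1
--             continue
--         if root_cause in failure_instance_scores[i][0]:
--             return i + 1 - os_count
--     return 0
-- ===== SOURCE B (Python) =====
-- def count(root_cause, failure_instance_scores):
--     filtered = [s for s in failure_instance_scores
--                 if 'os' not in s[0] and 'db' not in s[0]]
--     for idx, s in enumerate(filtered):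
--         if root_cause in s[0]:
--             return idx + 1
--     return 0
-- ===== Notes on version B (the rewrite author's own statement) =====
-- stated objective: simpler
-- what changed: Replaces the fused index loop with its os_count accumulator by two passes: first filter out 'os'/'db' entries, then enumerate the filtered list and return idx+1 at the first root_cause match.
import Mathlib
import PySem

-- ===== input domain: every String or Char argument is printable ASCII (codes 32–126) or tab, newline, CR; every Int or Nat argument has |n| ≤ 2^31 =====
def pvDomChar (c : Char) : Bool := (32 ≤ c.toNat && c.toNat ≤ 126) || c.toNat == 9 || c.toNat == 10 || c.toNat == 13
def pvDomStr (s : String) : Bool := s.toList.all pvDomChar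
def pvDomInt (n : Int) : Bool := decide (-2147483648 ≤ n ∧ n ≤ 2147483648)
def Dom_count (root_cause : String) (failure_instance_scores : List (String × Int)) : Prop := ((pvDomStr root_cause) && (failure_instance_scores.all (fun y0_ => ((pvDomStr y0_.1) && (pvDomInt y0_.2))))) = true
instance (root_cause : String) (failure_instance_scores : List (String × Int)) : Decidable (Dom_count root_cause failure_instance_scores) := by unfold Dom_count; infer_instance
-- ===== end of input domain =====

-- B replaces A's fused index loop with os_count accumulator by two passes: filter out 'os'/'db' names, then locate root_cause in the filtered list (objective: simpler).


-- ===== PORT A =====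
-- the Python for-loop over range(len(...)), carrying the index i and os_count
def countGo (root_cause : String) : List (String × Int) → Nat → Int → Int
  | [], _, _ => 0
  | s :: rest, i, os_count =>
    if PySem.Str.isIn "os" s.1 || PySem.Str.isIn "db" s.1 then
      countGo root_cause rest (i + 1) (os_count + 1)
    else if PySem.Str.isIn root_cause s.1 then
      (i : Int) + 1 - os_count
    else
      countGo root_cause rest (i + 1) os_count

def count (root_cause : String) (failure_instance_scores : List (String × Int)) : Int :=
  countGo root_cause failure_instance_scores 0 0

-- ===== PORT B =====
-- the locate pass: enumerate the filtered list, return idx+1 at the first match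
def locateGo (root_cause : String) : List (String × Int) → Nat → Int
  | [], _ => 0
  | s :: rest, idx =>
    if PySem.Str.isIn root_cause s.1 then (idx : Int) + 1
    else locateGo root_cause rest (idx + 1)

def count_alt (root_cause : String) (failure_instance_scores : List (String × Int)) : Int :=
  locateGo root_cause
    (failure_instance_scores.filter
      (fun s => !(PySem.Str.isIn "os" s.1) && !(PySem.Str.isIn "db" s.1)))
    0

-- ===== PRECONDITION & SPEC =====
def Spec_count (root_cause : String) (failure_instance_scores : List (String × Int)) (out : Int) : Prop := out = count_alt root_cause failure_instance_scores
instance (root_cause : String) (failure_instance_scores : List (String × Int)) (out : Int) : Decidable (Spec_count root_cause failure_instance_scores out) := by unfold Spec_count; infer_instance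

-- ===== CLAIM (what is proved, stated in full; the proofs are below) =====
def Claim_equal_count : Prop := ∀ (root_cause : String) (failure_instance_scores : List (String × Int)), Dom_count root_cause failure_instance_scores → Spec_count root_cause failure_instance_scores (count root_cause failure_instance_scores)

-- ===== LEMMAS AND PROOFS =====
-- invariant: i - os_count is the number of kept elements already seen, i.e. the index into the filtered list
lemma countGo_eq_locateGo (root_cause : String) (xs : List (String × Int)) :
    ∀ (i : Nat) (osc : Int), osc = (i : Int) - ((i : Int) - osc) → 0 ≤ (i : Int) - osc →
    countGo root_cause xs i osc =
      locateGo root_cause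
        (xs.filter (fun s => !(PySem.Str.isIn "os" s.1) && !(PySem.Str.isIn "db" s.1)))
        ((i : Int) - osc).toNat := by
  induction xs with
  | nil => intro i osc _ _; simp [countGo, locateGo]
  | cons s rest ih =>
    intro i osc h1 h2
    by_cases hskip : (PySem.Str.isIn "os" s.1 || PySem.Str.isIn "db" s.1) = true
    · have hkeep : (!PySem.Str.isIn "os" s.1 && !PySem.Str.isIn "db" s.1) = false := by
        cases hb : PySem.Str.isIn "os" s.1 <;> cases hd : PySem.Str.isIn "db" s.1 <;>
          simp_all
      have hrec := ih (i + 1) (osc + 1) (by push_cast; omega) (by push_cast; omega)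
      have hcast : ((i + 1 : Nat) : Int) - (osc + 1) = (i : Int) - osc := by push_cast; ring
      rw [hcast] at hrec
      simp only [countGo, hskip, if_pos trivial, List.filter_cons, hkeep,
        Bool.false_eq_true, if_false]
      exact hrec
    · have hkeep : (!PySem.Str.isIn "os" s.1 && !PySem.Str.isIn "db" s.1) = true := by
        cases hb : PySem.Str.isIn "os" s.1 <;> cases hd : PySem.Str.isIn "db" s.1 <;>
          simp_all
      simp only [countGo, hskip, if_false, List.filter_cons, hkeep, if_pos trivial,
        Bool.false_eq_true, locateGo]
      by_cases hmatch : PySem.Str.isIn root_cause s.1 = true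
      · simp only [hmatch, if_pos trivial]
        omega
      · simp only [hmatch, Bool.false_eq_true, if_false]
        have hrec := ih (i + 1) osc (by push_cast; omega) (by push_cast; omega)
        rw [hrec]
        congr 1
        omega

-- ===== VERDICT (by name: the statement is the Claim_ definition above) =====
theorem count_spec : Claim_equal_count := by
  intro root_cause xs _
  unfold Spec_count count count_alt
  simpa using countGo_eq_locateGo root_cause xs 0 0 (by omega) (by omega)
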